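-- pv_equiv track=rewrite | github.com/marie3003/junction_dataset | junction_analyis/diversity_metrics.py | divergence_points_from_aligned
-- ===== SOURCE A (Python) =====
-- def divergence_points_from_aligned(aln_a: str, aln_b: str) -> int:
--     """Count contiguous mismatching (or gap) runs between two aligned strings."""
--     assert len(aln_a) == len(aln_b)
--     count = 0
--     in_mismatch = False
--     for a, b in zip(aln_a, aln_b):
--         is_match = (a == b)  # (no double-gap columns in pairwise2)
--         if not is_match:
--             if not in_mismatch:
--                 count += 1
--                 in_mismatch = True
--         else:
--             in_mismatch = False
--     return count
-- ===== SOURCE B (Python) =====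
-- def divergence_points_from_aligned(aln_a: str, aln_b: str) -> int:
--     """Count contiguous mismatching (or gap) runs between two aligned strings.
--
--     Counting identity: a maximal mismatch run of length k contributes k mismatch
--     columns and k-1 adjacent mismatch pairs, so
--     #runs = #mismatch columns - #adjacent pairs of mismatch columns.
--     """
--     assert len(aln_a) == len(aln_b)
--     mis = [a != b for a, b in zip(aln_a, aln_b)]
--     return sum(mis) - sum(p and q for p, q in zip(mis, mis[1:]))
-- ===== Notes on version B (the rewrite author's own statement) =====
-- stated objective: alternative
-- what changed: Replaces the stateful in_mismatch run scan with a stateless counting identity: number of mismatch runs = (count of mismatch columns) - (count of adjacent column pairs that are both mismatches), computed as two independent sums.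
import Mathlib
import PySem

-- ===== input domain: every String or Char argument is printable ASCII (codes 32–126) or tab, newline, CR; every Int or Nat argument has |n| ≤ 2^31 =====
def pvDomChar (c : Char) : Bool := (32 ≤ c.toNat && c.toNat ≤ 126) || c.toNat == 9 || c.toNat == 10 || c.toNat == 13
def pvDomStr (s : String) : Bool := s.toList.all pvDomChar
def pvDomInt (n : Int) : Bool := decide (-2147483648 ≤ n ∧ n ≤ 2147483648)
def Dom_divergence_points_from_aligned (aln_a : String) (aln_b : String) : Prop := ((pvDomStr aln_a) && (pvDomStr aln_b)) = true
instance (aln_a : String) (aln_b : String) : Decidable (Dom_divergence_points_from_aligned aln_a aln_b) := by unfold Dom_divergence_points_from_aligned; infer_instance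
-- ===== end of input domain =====

-- B replaces A's stateful run scan by a counting identity:
-- #mismatch runs = #mismatch columns - #adjacent pairs of mismatch columns.

-- ===== PORT A =====
-- literal transliteration of A's loop: state (count, in_mismatch)
def divergence_points_from_aligned (aln_a : String) (aln_b : String) : Int :=
  (((aln_a.toList.zip aln_b.toList).foldl
      (fun (st : Int × Bool) (p : Char × Char) =>
        let is_match := p.1 == p.2
        if !is_match then
          if !st.2 then (st.1 + 1, true) else st
        else (st.1, false))
      (0, false))).1

-- ===== PORT B =====
-- mis = [a != b ...]; sum(mis) - sum(p and q for p, q in zip(mis, mis[1:]))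
def divergence_points_from_aligned_alt (aln_a : String) (aln_b : String) : Int :=
  let mis := (aln_a.toList.zip aln_b.toList).map (fun p => p.1 != p.2)
  ((mis.filter (fun x => x)).length : Int)
    - ((mis.zip mis.tail).filter (fun q => q.1 && q.2)).length

-- ===== PRECONDITION & SPEC =====
-- A asserts len(aln_a) == len(aln_b); on unequal lengths it raises AssertionError (so does B).
def Pre_divergence_points_from_aligned (aln_a : String) (aln_b : String) : Prop :=
  aln_a.toList.length = aln_b.toList.length
instance (aln_a : String) (aln_b : String) : Decidable (Pre_divergence_points_from_aligned aln_a aln_b) := by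
  unfold Pre_divergence_points_from_aligned; infer_instance
def pvWitness_divergence_points_from_aligned : String × String := ("ab-c", "abxc")

def Spec_divergence_points_from_aligned (aln_a : String) (aln_b : String) (out : Int) : Prop := out = divergence_points_from_aligned_alt aln_a aln_b
instance (aln_a : String) (aln_b : String) (out : Int) : Decidable (Spec_divergence_points_from_aligned aln_a aln_b out) := by unfold Spec_divergence_points_from_aligned; infer_instance

-- ===== CLAIM (what is proved, stated in full; the proofs are below) =====
def Claim_equal_divergence_points_from_aligned : Prop := ∀ (aln_a : String) (aln_b : String), Dom_divergence_points_from_aligned aln_a aln_b → Pre_divergence_points_from_aligned aln_a aln_b → Spec_divergence_points_from_aligned aln_a aln_b (divergence_points_from_aligned aln_a aln_b)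

-- ===== LEMMAS AND PROOFS =====

-- A's loop body, over the mismatch boolean (defeq image of the port's lambda under map)
def pvStepA (st : Int × Bool) (y : Bool) : Int × Bool :=
  if y then (if !st.2 then (st.1 + 1, true) else st) else (st.1, false)

-- A's count increment from flag m over the list of mismatch booleans
def pvG : Bool → List Bool → Int
  | _, [] => 0
  | m, x :: xs => (if x = true ∧ m = false then 1 else 0) + pvG x xs

theorem pvFoldA (l : List Bool) : ∀ (c : Int) (m : Bool),
    (l.foldl pvStepA (c, m)).1 = c + pvG m l := by
  induction l with
  | nil => intro c m; simp [pvG]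
  | cons x xs ih =>
    intro c m
    cases x <;> cases m <;> simp [pvStepA, pvG, ih] <;> ring

-- B's two counts over the mismatch list
def pvCnt (l : List Bool) : Int := ((l.filter (fun x => x)).length : Int)
def pvAdj (l : List Bool) : Int := (((l.zip l.tail).filter (fun q => q.1 && q.2)).length : Int)

theorem pvG_eq : ∀ (l : List Bool) (m : Bool),
    pvG m l = pvCnt l - pvAdj l - (if m = true ∧ l.head? = some true then 1 else 0) := by
  intro l
  induction l with
  | nil => intro m; simp [pvG, pvCnt, pvAdj]
  | cons x xs ih =>
    intro m
    have hadj : pvAdj (x :: xs) = (if x = true ∧ xs.head? = some true then 1 else 0) + pvAdj xs := by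
      cases xs with
      | nil => simp [pvAdj]
      | cons y ys =>
        simp only [pvAdj, List.tail_cons, List.zip_cons_cons, List.filter_cons, List.head?_cons]
        cases x <;> cases y <;> simp; ring
    have hcnt : pvCnt (x :: xs) = (if x = true then 1 else 0) + pvCnt xs := by
      simp only [pvCnt, List.filter_cons]
      cases x <;> simp <;> ring
    rw [pvG, ih x, hadj, hcnt]
    cases x <;> cases m <;> cases h : xs.head? with
    | none => simp <;> ring
    | some b => cases b <;> simp <;> ring

-- ===== VERDICT (by name: the statement is the Claim_ definition above) =====
theorem divergence_points_from_aligned_spec : Claim_equal_divergence_points_from_aligned := by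
  intro a b _ _
  unfold Spec_divergence_points_from_aligned
  have hfold :
      divergence_points_from_aligned a b
      = (List.foldl pvStepA (0, false)
          (List.map (fun p : Char × Char => p.1 != p.2) (a.toList.zip b.toList))).1 := by
    rw [List.foldl_map]
    rfl
  rw [hfold, pvFoldA _ 0 false, pvG_eq]
  simp [divergence_points_from_aligned_alt, pvCnt, pvAdj]
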